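-- pv_equiv track=rewrite | github.com/AvishekParajuli/FB-Image-similarity-competition | triplet_hardlibtf.py | getHardNegList
-- ===== SOURCE A (Python) =====
-- def getHardNegList(I, k =1):
--   out =[]
--   lenI= len(I)
--   if k==1:
--     matches = [index for index, value in enumerate(I) if value[0]==index]
--   else:
--     matches = [index for index, value in enumerate(I) if index in value[0:k]]
--   #non_matching_idx = [i for i in range(lenI) if i not in matches]
--   non_matching_idx = [i for i in range(lenI) if i not in matches]
--   negIdx = [I[ii][0] for ii in non_matching_idx]
--   return non_matching_idx, negIdx
-- ===== SOURCE B (Python) =====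
-- def getHardNegList(I, k=1):
--     # Single pass: decide the match inline per row and collect both outputs at once;
--     # no intermediate 'matches' table, no membership scan over it.
--     non_matching_idx = []
--     negIdx = []
--     for index, value in enumerate(I):
--         if k == 1:
--             is_match = value[0] == index
--         else:
--             is_match = index in value[0:k]
--         if not is_match:
--             non_matching_idx.append(index)
--             negIdx.append(value[0])
--     return non_matching_idx, negIdx
-- ===== Notes on version B (the rewrite author's own statement) =====
-- stated objective: simpler
-- what changed: Replaces A's three passes (build a 'matches' index table, filter range(len(I)) by a linear membership scan over that table, then a third pass indexing I) with a single loop over enumerate(I) that tests each row inline and appends its index and head to both outputs at once.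
-- outside the precondition, e.g. on getHardNegList([[]], 1): A raises IndexError, B raises IndexError; on getHardNegList([[1], []], 2): A raises IndexError, B raises IndexError
import Mathlib
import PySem

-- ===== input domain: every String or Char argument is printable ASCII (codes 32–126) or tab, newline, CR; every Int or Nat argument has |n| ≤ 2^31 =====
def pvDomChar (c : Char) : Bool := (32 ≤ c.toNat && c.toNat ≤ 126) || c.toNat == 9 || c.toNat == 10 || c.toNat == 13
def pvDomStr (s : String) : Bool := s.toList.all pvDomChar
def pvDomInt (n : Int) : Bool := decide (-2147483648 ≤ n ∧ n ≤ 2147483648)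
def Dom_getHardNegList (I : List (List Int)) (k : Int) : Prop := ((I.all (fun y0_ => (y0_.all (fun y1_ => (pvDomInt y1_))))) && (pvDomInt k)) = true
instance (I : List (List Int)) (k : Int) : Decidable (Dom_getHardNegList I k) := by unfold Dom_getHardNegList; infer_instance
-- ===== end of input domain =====

-- B replaces A's three passes (build 'matches', filter range by membership, map indices)
-- by one pass over enumerate(I) collecting both output lists at once; objective: simpler.

-- ===== PORT A =====
def getHardNegList (I : List (List Int)) (k : Int) : List Int × List Int :=
  let lenI : Int := I.length
  let matchesA : List Int :=
    if k = 1 then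
      ((PySem.List.enumerate I 0).filter
        (fun p => ((PySem.List.pyGet? p.2 0).getD 0) == p.1)).map (·.1)
    else
      ((PySem.List.enumerate I 0).filter
        (fun p => decide (p.1 ∈ PySem.List.slice p.2 (some 0) (some k)))).map (·.1)
  let nonMatchingIdx : List Int :=
    (PySem.List.pyRange 0 lenI 1).filter (fun i => !(decide (i ∈ matchesA)))
  let negIdx : List Int :=
    nonMatchingIdx.map (fun ii =>
      (PySem.List.pyGet? ((PySem.List.pyGet? I ii).getD []) 0).getD 0)
  (nonMatchingIdx, negIdx)

-- ===== PORT B =====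
def getHardNegList_alt (I : List (List Int)) (k : Int) : List Int × List Int :=
  (PySem.List.enumerate I 0).foldl
    (fun acc p =>
      let isMatch : Bool :=
        if k = 1 then ((PySem.List.pyGet? p.2 0).getD 0) == p.1
        else decide (p.1 ∈ PySem.List.slice p.2 (some 0) (some k))
      if isMatch then acc
      else (acc.1 ++ [p.1], acc.2 ++ [(PySem.List.pyGet? p.2 0).getD 0]))
    ([], [])

-- ===== PRECONDITION & SPEC =====
-- Python A raises IndexError exactly when some row of I is empty (value[0] / I[ii][0]).
def Pre_getHardNegList (I : List (List Int)) (k : Int) : Prop := ∀ row ∈ I, row ≠ []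
instance (I : List (List Int)) (k : Int) : Decidable (Pre_getHardNegList I k) := by
  unfold Pre_getHardNegList; infer_instance

def pvWitness_getHardNegList : List (List Int) × Int := ([[0, 3], [0, 1]], 1)

def Spec_getHardNegList (I : List (List Int)) (k : Int) (out : List Int × List Int) : Prop := out = getHardNegList_alt I k
instance (I : List (List Int)) (k : Int) (out : List Int × List Int) : Decidable (Spec_getHardNegList I k out) := by unfold Spec_getHardNegList; infer_instance

-- ===== CLAIM (what is proved, stated in full; the proofs are below) =====
def Claim_equal_getHardNegList : Prop := ∀ (I : List (List Int)) (k : Int), Dom_getHardNegList I k → Pre_getHardNegList I k → Spec_getHardNegList I k (getHardNegList I k)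

-- ===== LEMMAS AND PROOFS =====

-- the per-row match test both programs apply
def pvIsM (k : Int) (p : Int × List Int) : Bool :=
  if k = 1 then ((PySem.List.pyGet? p.2 0).getD 0) == p.1
  else decide (p.1 ∈ PySem.List.slice p.2 (some 0) (some k))

-- B's fold appends exactly the unmatched rows' index and head
theorem alt_foldl_eq (k : Int) (l : List (Int × List Int)) (acc : List Int × List Int) :
    l.foldl (fun acc p => if pvIsM k p then acc
        else (acc.1 ++ [p.1], acc.2 ++ [(PySem.List.pyGet? p.2 0).getD 0])) acc
    = (acc.1 ++ ((l.filter (fun p => !(pvIsM k p))).map (·.1)),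
       acc.2 ++ ((l.filter (fun p => !(pvIsM k p))).map
         (fun p => (PySem.List.pyGet? p.2 0).getD 0))) := by
  induction l generalizing acc with
  | nil => simp
  | cons p l ih =>
    rw [List.foldl_cons, List.filter_cons]
    cases h : pvIsM k p
    · simp [ih]
    · simp [ih]

-- membership of an index in A's matches list ↔ its own row matches
theorem mem_matches_iff (I : List (List Int)) (k : Int) (p : Int × List Int)
    (hp : p ∈ PySem.List.enumerate I 0) :
    p.1 ∈ (((PySem.List.enumerate I 0).filter (pvIsM k)).map (·.1)) ↔ pvIsM k p = true := by
  constructor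
  · rintro hm
    rcases List.mem_map.1 hm with ⟨q, hq, hfst⟩
    rcases List.mem_filter.1 hq with ⟨hqe, hqm⟩
    rcases (PySem.List.mem_enumerate_iff _ _ _).1 hp with ⟨j, hj, rfl⟩
    rcases (PySem.List.mem_enumerate_iff _ _ _).1 hqe with ⟨j', hj', rfl⟩
    have : j' = j := by simp at hfst; omega
    subst this
    simpa using hqm
  · intro hm
    exact List.mem_map.2 ⟨p, List.mem_filter.2 ⟨hp, hm⟩, rfl⟩

-- ===== VERDICT (by name: the statement is the Claim_ definition above) =====
theorem getHardNegList_spec : Claim_equal_getHardNegList := by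
  intro I k _ _
  unfold Spec_getHardNegList getHardNegList getHardNegList_alt
  have hfun : (fun (acc : List Int × List Int) (p : Int × List Int) =>
      let isMatch : Bool :=
        if k = 1 then ((PySem.List.pyGet? p.2 0).getD 0) == p.1
        else decide (p.1 ∈ PySem.List.slice p.2 (some 0) (some k))
      if isMatch then acc
      else (acc.1 ++ [p.1], acc.2 ++ [(PySem.List.pyGet? p.2 0).getD 0]))
      = (fun acc p => if pvIsM k p then acc
          else (acc.1 ++ [p.1], acc.2 ++ [(PySem.List.pyGet? p.2 0).getD 0])) := rfl
  rw [hfun, alt_foldl_eq]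
  simp only [List.nil_append]
  have hmatches :
      (if k = 1 then
        ((PySem.List.enumerate I 0).filter
          (fun p => ((PySem.List.pyGet? p.2 0).getD 0) == p.1)).map (·.1)
      else
        ((PySem.List.enumerate I 0).filter
          (fun p => decide (p.1 ∈ PySem.List.slice p.2 (some 0) (some k)))).map (·.1))
      = ((PySem.List.enumerate I 0).filter (pvIsM k)).map (·.1) := by
    by_cases h : k = 1
    · rw [if_pos h]
      congr 1
      apply List.filter_congr
      intro p _
      simp [pvIsM, h]
    · rw [if_neg h]
      congr 1
      apply List.filter_congr
      intro p _
      simp [pvIsM, h]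
  rw [hmatches]
  have hrange : PySem.List.pyRange 0 (I.length : Int) 1
      = (PySem.List.enumerate I 0).map (·.1) := by
    rw [PySem.List.map_fst_enumerate]; norm_num
  have hnm :
      (PySem.List.pyRange 0 (I.length : Int) 1).filter
        (fun i => !(decide (i ∈ (((PySem.List.enumerate I 0).filter (pvIsM k)).map (·.1)))))
      = ((PySem.List.enumerate I 0).filter (fun p => !(pvIsM k p))).map (·.1) := by
    rw [hrange, List.filter_map]
    congr 1
    apply List.filter_congr
    intro p hp
    simp [Function.comp, mem_matches_iff I k p hp]
  rw [hnm]
  refine congrArg₂ Prod.mk rfl ?_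
  rw [List.map_map]
  apply List.map_congr_left
  intro p hp
  have hp' : p ∈ PySem.List.enumerate I 0 := (List.mem_filter.1 hp).1
  rcases (PySem.List.mem_enumerate_iff _ _ _).1 hp' with ⟨j, hj, rfl⟩
  simp [PySem.List.pyGet?_natCast, List.getElem?_eq_getElem hj]
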